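-- pv_equiv track=rewrite | github.com/miliar/Code_Jam_Webscraper | solutions_python/Problem_178/1800.py | pancake
-- ===== SOURCE A (Python) =====
-- def pancake(a):
-- 	ans=0
-- 	temp=a[0]
-- 	if a=="":
-- 		return 0
-- 	for i in a:
-- 		if i!=temp:
-- 			ans+=1
-- 			temp=i
-- 	if i=="+":
-- 		return ans
-- 	else:
-- 		return ans+1
-- ===== SOURCE B (Python) =====
-- def pancake(a):
--     # Run-counting algorithm: append a virtual plus pancake under the stack,
--     # then count the maximal runs of equal characters by skipping each run
--     # with an inner scan; each boundary between runs costs one flip.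
--     s = a + '+'
--     runs = 0
--     i = 0
--     n = len(s)
--     while i < n:
--         c = s[i]
--         while i < n and s[i] == c:
--             i += 1
--         runs += 1
--     return runs - 1
-- ===== Notes on version B (the rewrite author's own statement) =====
-- stated objective: alternative
-- what changed: Replaces A's per-character temp-carrying transition counter with a run-counting algorithm: append a virtual plus pancake under the stack and count the maximal runs of equal characters via an outer loop over runs with an inner scan skipping each run; the answer is runs minus one.
import Mathlib
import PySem

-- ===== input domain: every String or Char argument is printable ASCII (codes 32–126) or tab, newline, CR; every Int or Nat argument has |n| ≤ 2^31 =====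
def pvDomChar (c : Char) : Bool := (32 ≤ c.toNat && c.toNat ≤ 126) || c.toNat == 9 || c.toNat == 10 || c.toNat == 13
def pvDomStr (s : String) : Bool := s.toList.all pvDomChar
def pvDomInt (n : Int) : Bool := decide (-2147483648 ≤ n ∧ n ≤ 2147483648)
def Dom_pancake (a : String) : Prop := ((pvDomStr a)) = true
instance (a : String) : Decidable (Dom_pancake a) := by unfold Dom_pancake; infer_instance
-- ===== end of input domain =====

-- B counts maximal runs of equal characters (with a virtual plus pancake appended) instead of A's
-- temp-carrying transition loop; same O(n) cost, return values only.

-- ===== PORT A =====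
def pancake (a : String) : Int :=
  let l := a.toList
  match PySem.List.pyGet? l 0 with      -- temp = a[0]; IndexError on "" (excluded by Pre_)
  | none => 0
  | some t0 =>
    if a = "" then 0
    else
      -- for i in a: if i != temp: ans += 1; temp = i   (state = (ans, temp))
      let st := l.foldl (fun (s : Int × Char) i => if i != s.2 then (s.1 + 1, i) else s) (0, t0)
      -- after the loop, i is the last character of a (a is nonempty here)
      match l.getLast? with
      | none => 0
      | some i => if i = '+' then st.1 else st.1 + 1

-- ===== PORT B =====
-- inner "while i < n and s[i] == c: i += 1" : skip the current run of c (recursion on the suffix)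
def pancake_skipRun (c : Char) : List Char → List Char
  | [] => []
  | x :: xs => if x == c then pancake_skipRun c xs else x :: xs

theorem pancake_skipRun_length_le (c : Char) (xs : List Char) :
    (pancake_skipRun c xs).length ≤ xs.length := by
  induction xs with
  | nil => simp [pancake_skipRun]
  | cons x xs ih =>
    simp only [pancake_skipRun]
    split
    · exact le_trans ih (Nat.le_succ _)
    · simp

-- outer "while i < n: c = s[i]; <skip run>; runs += 1" (recursion on the suffix)
def pancake_runs : List Char → Int
  | [] => 0
  | c :: xs => 1 + pancake_runs (pancake_skipRun c xs)
termination_by l => l.length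
decreasing_by
  exact Nat.lt_succ_of_le (pancake_skipRun_length_le c xs)

def pancake_alt (a : String) : Int :=
  pancake_runs (a.toList ++ ['+']) - 1    -- s = a + '+'; runs - 1

-- ===== PRECONDITION & SPEC =====
-- Pre_ excludes only the empty string, on which A raises IndexError (a[0]).
def Pre_pancake (a : String) : Prop := a ≠ ""
instance (a : String) : Decidable (Pre_pancake a) := by unfold Pre_pancake; infer_instance
def pvWitness_pancake : String := ("-+-")
def Spec_pancake (a : String) (out : Int) : Prop := out = pancake_alt a
instance (a : String) (out : Int) : Decidable (Spec_pancake a out) := by unfold Spec_pancake; infer_instance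

-- ===== CLAIM (what is proved, stated in full; the proofs are below) =====
def Claim_equal_pancake : Prop := ∀ (a : String), Dom_pancake a → Pre_pancake a → Spec_pancake a (pancake a)

-- ===== LEMMAS AND PROOFS =====

-- T l: number of mismatching adjacent pairs of l
def pancakeT (l : List Char) : Int :=
  ((l.zip l.tail).countP (fun p => p.1 != p.2) : Nat)

-- A's loop counts exactly the mismatching adjacent pairs of t :: l.
theorem pancake_fold_count (l : List Char) (n : Int) (t : Char) :
    (l.foldl (fun (s : Int × Char) i => if i != s.2 then (s.1 + 1, i) else s) (n, t)).1
      = n + pancakeT (t :: l) := by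
  induction l generalizing n t with
  | nil => simp [pancakeT]
  | cons i rest ih =>
    by_cases h : i = t
    · subst h
      simp only [List.foldl_cons, bne_self_eq_false, Bool.false_eq_true, if_false]
      rw [ih]
      simp [pancakeT, List.zip_cons_cons]
    · have hne : (i != t) = true := by simp [bne, h]
      have hne' : (t != i) = true := by simp [bne]; exact fun e => h e.symm
      simp only [List.foldl_cons, hne, if_true]
      rw [ih]
      simp only [pancakeT, List.tail_cons, List.zip_cons_cons, List.countP_cons, hne']
      push_cast
      ring

-- skipping the run of c and counting runs of the rest = mismatch count of c :: xs
theorem pancake_runs_skip (xs : List Char) (c : Char) :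
    pancake_runs (pancake_skipRun c xs) = pancakeT (c :: xs) := by
  induction xs generalizing c with
  | nil => simp [pancake_skipRun, pancake_runs, pancakeT]
  | cons x r ih =>
    by_cases h : x = c
    · subst h
      simp only [pancake_skipRun, beq_self_eq_true, if_true]
      rw [ih]
      simp [pancakeT, List.zip_cons_cons]
    · have hxc : (x == c) = false := by simp [h]
      have hne : (c != x) = true := by simp [bne]; exact fun e => h e.symm
      simp only [pancake_skipRun, hxc, Bool.false_eq_true, if_false]
      rw [pancake_runs, ih]
      simp only [pancakeT, List.tail_cons, List.zip_cons_cons, List.countP_cons, hne]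
      push_cast
      ring

theorem pancake_runs_cons (c : Char) (xs : List Char) :
    pancake_runs (c :: xs) = 1 + pancakeT (c :: xs) := by
  rw [pancake_runs, pancake_runs_skip]

-- appending one element adds a mismatch iff it differs from the last element
theorem pancakeT_append_last (l : List Char) (t x : Char) :
    pancakeT ((t :: l) ++ [x])
      = pancakeT (t :: l) + (if (t :: l).getLast? = some x then 0 else 1) := by
  induction l generalizing t with
  | nil =>
    by_cases h : t = x
    · simp [pancakeT, h]
    · have : (t != x) = true := by simp [bne, h]
      simp [pancakeT, this, h]
  | cons y r ih =>
    have := ih y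
    simp only [List.cons_append] at this ⊢
    simp only [pancakeT, List.tail_cons, List.zip_cons_cons, List.countP_cons] at this ⊢
    have hlast : (t :: y :: r).getLast? = (y :: r).getLast? := by
      simp [List.getLast?_cons_cons]
    rw [hlast]
    push_cast at this ⊢
    omega

theorem pancake_spec' (a : String) (hpre : a ≠ "") : pancake a = pancake_alt a := by
  have hl : a.toList ≠ [] := by simpa [String.toList_eq_nil_iff] using hpre
  obtain ⟨h, l', hcons⟩ : ∃ h l', a.toList = h :: l' :=
    match a.toList, hl with
    | x :: xs, _ => ⟨x, xs, rfl⟩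
  have hlast : ∃ c, (h :: l').getLast? = some c := by
    cases e : (h :: l').getLast? with
    | none => simp [List.getLast?_eq_none_iff] at e
    | some c => exact ⟨c, rfl⟩
  obtain ⟨c, hc⟩ := hlast
  unfold pancake pancake_alt
  rw [hcons]
  simp only [PySem.List.pyGet?_zero_cons, hc, if_neg hpre, List.cons_append]
  rw [pancake_fold_count, pancake_runs_cons]
  have hT : pancakeT (h :: (l' ++ ['+']))
      = pancakeT (h :: l') + (if (h :: l').getLast? = some '+' then 0 else 1) := by
    simpa using pancakeT_append_last l' h '+'
  rw [hT, hc]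
  have hdup : pancakeT (h :: h :: l') = pancakeT (h :: l') := by
    simp [pancakeT, List.zip_cons_cons]
  rw [hdup]
  by_cases hcp : c = '+'
  · simp [hcp]
  · have : ¬ (some c = some '+') := by simp [hcp]
    simp only [if_neg hcp, if_neg this]
    ring

-- ===== VERDICT (by name: the statement is the Claim_ definition above) =====
theorem pancake_spec : Claim_equal_pancake := by
  intro a _ hpre
  unfold Spec_pancake
  exact pancake_spec' a hpre
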